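-- pv_equiv track=rewrite | github.com/namin/argument-debugger | as_end2end.py | defense_depth
-- ===== SOURCE A (Python) =====
-- from typing import Dict, List, Set, Tuple, FrozenSet, Optional
--
-- def _F(atoms: List[str], attacks: Set[Tuple[str,str]], S: Set[str]) -> Set[str]:
--     """Characteristic function F(S) over APX atoms (for insights)."""
--     attackers: Dict[str, Set[str]] = {a: set() for a in atoms}
--     for (u,v) in attacks:
--         if v in attackers:
--             attackers[v].add(u)
--     defended = set()
--     for a in atoms:
--         ok = True
--         for b in attackers[a]:
--             if not any((c, b) in attacks for c in S):
--                 ok = False; break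
--         if ok:
--             defended.add(a)
--     return defended
--
-- def defense_depth(atoms: List[str], attacks: Set[Tuple[str,str]]) -> Dict[str, Optional[int]]:
--     depth = {a: None for a in atoms}
--     S = set()
--     i = 0
--     while True:
--         T = _F(atoms, attacks, S)
--         if T == S: break
--         wave = T - S
--         i += 1
--         for a in wave:
--             if depth[a] is None:
--                 depth[a] = i
--         S = T
--     return depth
-- ===== SOURCE B (Python) =====
-- def defense_depth(atoms, attacks):
--     # Layered computation of the grounded extension: attacker and target lists
--     # are built once; each round scans only the still-undecided atoms, testing
--     # attackers against an incrementally grown set of already-defeated atoms.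
--     depth = dict.fromkeys(atoms)
--     attackers = {a: [] for a in depth}
--     for (u, v) in attacks:
--         if v in attackers:
--             attackers[v].append(u)
--     targets = {}
--     for (u, v) in attacks:
--         targets.setdefault(u, []).append(v)
--     defeated = set()
--     undecided = list(depth)
--     i = 0
--     while True:
--         wave = [a for a in undecided if all(b in defeated for b in attackers[a])]
--         if not wave:
--             break
--         i += 1
--         for a in wave:
--             depth[a] = i
--         wave_set = set(wave)
--         undecided = [a for a in undecided if a not in wave_set]
--         for c in wave:
--             for v in targets.get(c, []):
--                 defeated.add(v)
--     return depth
-- ===== Notes on version B (the rewrite author's own statement) =====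
-- stated objective: faster
-- what changed: Instead of re-running the characteristic function F from scratch every round (rebuilding the attacker dict and re-scanning S for every attacker of every atom) until a fixpoint test on set equality, B precomputes the attacker lists once and grows the grounded extension wave by wave over only the still-undecided atoms, maintaining the set of already-defeated attackers incrementally and stopping when a wave is empty.
import Mathlib
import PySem

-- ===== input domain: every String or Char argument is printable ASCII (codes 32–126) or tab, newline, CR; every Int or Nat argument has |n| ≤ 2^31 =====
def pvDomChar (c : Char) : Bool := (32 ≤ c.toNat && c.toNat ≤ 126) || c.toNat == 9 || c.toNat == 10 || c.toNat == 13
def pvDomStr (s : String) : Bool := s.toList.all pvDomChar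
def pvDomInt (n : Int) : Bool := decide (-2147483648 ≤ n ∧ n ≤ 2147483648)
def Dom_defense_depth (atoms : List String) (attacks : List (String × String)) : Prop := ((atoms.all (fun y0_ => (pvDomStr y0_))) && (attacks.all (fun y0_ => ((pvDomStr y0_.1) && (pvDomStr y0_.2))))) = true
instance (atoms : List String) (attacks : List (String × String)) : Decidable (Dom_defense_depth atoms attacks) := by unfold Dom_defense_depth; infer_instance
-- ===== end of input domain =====

-- B recomputes nothing: attacker lists are built once and the grounded extension
-- grows wave by wave over the still-undecided atoms, using an incrementally
-- maintained set of already-defeated attackers (objective: faster).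

-- ===== PORT A =====
-- characteristic function F(S) (helper _F of A)
def pvF (atoms : List String) (attacks : List (String × String)) (S : PySem.Set String) : PySem.Set String :=
  let attackers : PySem.Dict String (PySem.Set String) :=
    atoms.foldl (fun d a => d.insert a PySem.Set.empty) PySem.Dict.empty
  let attackers : PySem.Dict String (PySem.Set String) :=
    attacks.foldl (fun d uv =>
      if d.contains uv.2 then d.modify uv.2 PySem.Set.empty (fun s => PySem.Set.add s uv.1) else d)
      attackers
  atoms.foldl (fun defended a =>
    let ok := (attackers.getD a PySem.Set.empty).all
      (fun b => S.any (fun c => attacks.contains (c, b)))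
    if ok then PySem.Set.add defended a else defended) PySem.Set.empty

-- A's 'while True' loop; fuel = |atoms| + 1 bounds the rounds (S grows strictly)
def pvLoopA (atoms : List String) (attacks : List (String × String)) :
    Nat → PySem.Dict String (Option Int) → PySem.Set String → Int → PySem.Dict String (Option Int)
  | 0, depth, _, _ => depth
  | fuel + 1, depth, S, i =>
    let T := pvF atoms attacks S
    if PySem.Set.equal T S then depth
    else
      let wave := PySem.Set.diff T S
      let i' := i + 1
      let depth := wave.foldl
        (fun d a => if d.get? a = some none then d.insert a (some i') else d) depth
      pvLoopA atoms attacks fuel depth T i'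

def defense_depth (atoms : List String) (attacks : List (String × String)) : List (String × Option Int) :=
  let depth : PySem.Dict String (Option Int) :=
    atoms.foldl (fun d a => d.insert a (none : Option Int)) PySem.Dict.empty
  (pvLoopA atoms attacks (atoms.length + 1) depth PySem.Set.empty 0).items

-- ===== PORT B =====
-- B's 'while True' loop: one wave per round over the undecided atoms only;
-- 'defeated' is maintained incrementally via the precomputed target lists
def pvLoopB (attacks : List (String × String)) (attackers targets : PySem.Dict String (List String)) :
    Nat → PySem.Dict String (Option Int) → PySem.Set String → List String → Int →
      PySem.Dict String (Option Int)
  | 0, depth, _, _, _ => depth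
  | fuel + 1, depth, defeated, undecided, i =>
    let wave := undecided.filter
      (fun a => (attackers.getD a []).all (fun b => PySem.Set.contains defeated b))
    if wave.isEmpty then depth
    else
      let i' := i + 1
      let depth := wave.foldl (fun d a => d.insert a (some i')) depth
      let waveSet := PySem.Set.ofList wave
      let undecided := undecided.filter (fun a => !(PySem.Set.contains waveSet a))
      let defeated := wave.foldl
        (fun s c => (targets.getD c []).foldl (fun s v => PySem.Set.add s v) s) defeated
      pvLoopB attacks attackers targets fuel depth defeated undecided i'

def defense_depth_alt (atoms : List String) (attacks : List (String × String)) : List (String × Option Int) :=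
  let keys := PySem.List.dedup atoms                                  -- dict.fromkeys(atoms)
  let depth : PySem.Dict String (Option Int) :=
    PySem.Dict.mk (keys.map (fun a => (a, (none : Option Int))))
  let attackers : PySem.Dict String (List String) :=
    PySem.Dict.mk (keys.map (fun a => (a, ([] : List String))))
  let attackers : PySem.Dict String (List String) :=
    attacks.foldl (fun d uv =>
      if d.contains uv.2 then d.modify uv.2 [] (fun l => l ++ [uv.1]) else d) attackers
  let targets : PySem.Dict String (List String) :=
    attacks.foldl (fun t uv => t.modify uv.1 [] (fun l => l ++ [uv.2])) PySem.Dict.empty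
  (pvLoopB attacks attackers targets (atoms.length + 1) depth PySem.Set.empty keys 0).items

-- ===== PRECONDITION & SPEC =====
def Spec_defense_depth (atoms : List String) (attacks : List (String × String)) (out : List (String × Option Int)) : Prop := out = defense_depth_alt atoms attacks
instance (atoms : List String) (attacks : List (String × String)) (out : List (String × Option Int)) : Decidable (Spec_defense_depth atoms attacks out) := by unfold Spec_defense_depth; infer_instance

-- ===== CLAIM (what is proved, stated in full; the proofs are below) =====
def Claim_equal_defense_depth : Prop := ∀ (atoms : List String) (attacks : List (String × String)), Dom_defense_depth atoms attacks → Spec_defense_depth atoms attacks (defense_depth atoms attacks)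

-- ===== LEMMAS AND PROOFS =====

-- B's attackers dict: lookup in a dict built as a comprehension over distinct keys
theorem pv_get?_mk_map {ν : Type} (l : List String) (f : String → ν) (x : String) :
    (PySem.Dict.mk (l.map (fun a => (a, f a)))).get? x
      = if x ∈ l then some (f x) else none := by
  induction l with
  | nil => simp [PySem.Dict.get?]
  | cons a t ih =>
    simp only [List.map_cons, PySem.Dict.get?_mk_cons, ih, List.mem_cons]
    by_cases h : a = x
    · subst h; simp
    · have hax : (a == x) = false := by simp [h]
      have hxa : ¬ (x = a) := fun hh => h hh.symm
      simp [hax, hxa]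

-- A's first attackers fold (dict comprehension {a: set() for a in atoms})
theorem pv_attA_init (atoms : List String) (d : PySem.Dict String (PySem.Set String)) (x : String) :
    (atoms.foldl (fun d a => d.insert a PySem.Set.empty) d).get? x
      = if x ∈ atoms then some PySem.Set.empty else d.get? x := by
  induction atoms generalizing d with
  | nil => simp
  | cons a t ih =>
    simp only [List.foldl_cons, ih, PySem.Dict.get?_insert, List.mem_cons]
    by_cases hx : x ∈ t
    · simp [hx]
    · by_cases hxa : x = a <;> simp [hx, hxa]

-- A's second attackers fold: membership in the per-atom attacker set
theorem pv_attA_mem (attacks : List (String × String))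
    (d : PySem.Dict String (PySem.Set String)) (x u : String) :
    u ∈ (attacks.foldl (fun d uv =>
      if d.contains uv.2 then d.modify uv.2 PySem.Set.empty (fun s => PySem.Set.add s uv.1) else d)
      d).getD x PySem.Set.empty
      ↔ u ∈ d.getD x PySem.Set.empty ∨ (d.contains x = true ∧ (u, x) ∈ attacks) := by
  induction attacks generalizing d with
  | nil => simp
  | cons uv rest ih =>
    simp only [List.foldl_cons]
    by_cases h : d.contains uv.2 = true
    · rw [if_pos h, ih]
      have hcontm : (d.modify uv.2 PySem.Set.empty (fun s => PySem.Set.add s uv.1)).contains x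
          = d.contains x := by
        rw [PySem.Dict.contains_modify]
        by_cases hx : x = uv.2
        · subst hx; simp [h]
        · simp [hx]
      rw [hcontm]
      by_cases hx : x = uv.2
      · subst hx
        rw [PySem.Dict.getD_modify, if_pos rfl, PySem.Set.mem_add]
        constructor
        · rintro ((hm | he) | ⟨hc, hr⟩)
          · exact Or.inl hm
          · refine Or.inr ⟨h, List.mem_cons.mpr (Or.inl ?_)⟩
            rw [he]
          · exact Or.inr ⟨hc, List.mem_cons.mpr (Or.inr hr)⟩
        · rintro (hm | ⟨hc, hm2⟩)
          · exact Or.inl (Or.inl hm)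
          · rcases List.mem_cons.mp hm2 with he | hr
            · exact Or.inl (Or.inr (congrArg Prod.fst he))
            · exact Or.inr ⟨hc, hr⟩
      · rw [PySem.Dict.getD_modify, if_neg hx]
        constructor
        · rintro (hm | ⟨hc, hr⟩)
          · exact Or.inl hm
          · exact Or.inr ⟨hc, List.mem_cons.mpr (Or.inr hr)⟩
        · rintro (hm | ⟨hc, hm2⟩)
          · exact Or.inl hm
          · rcases List.mem_cons.mp hm2 with he | hr
            · exact absurd (congrArg Prod.snd he) hx
            · exact Or.inr ⟨hc, hr⟩
    · rw [if_neg h, ih]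
      constructor
      · rintro (hm | ⟨hc, hr⟩)
        · exact Or.inl hm
        · exact Or.inr ⟨hc, List.mem_cons.mpr (Or.inr hr)⟩
      · rintro (hm | ⟨hc, hm2⟩)
        · exact Or.inl hm
        · rcases List.mem_cons.mp hm2 with he | hr
          · exfalso
            have hx2 : x = uv.2 := congrArg Prod.snd he
            rw [hx2] at hc
            exact h hc
          · exact Or.inr ⟨hc, hr⟩

-- B's attackers fold: membership in the per-atom attacker list
theorem pv_attB_mem (attacks : List (String × String))
    (d : PySem.Dict String (List String)) (x u : String) :
    u ∈ (attacks.foldl (fun d uv =>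
      if d.contains uv.2 then d.modify uv.2 [] (fun l => l ++ [uv.1]) else d)
      d).getD x []
      ↔ u ∈ d.getD x [] ∨ (d.contains x = true ∧ (u, x) ∈ attacks) := by
  induction attacks generalizing d with
  | nil => simp
  | cons uv rest ih =>
    simp only [List.foldl_cons]
    by_cases h : d.contains uv.2 = true
    · rw [if_pos h, ih]
      have hcontm : (d.modify uv.2 [] (fun l => l ++ [uv.1])).contains x = d.contains x := by
        rw [PySem.Dict.contains_modify]
        by_cases hx : x = uv.2
        · subst hx; simp [h]
        · simp [hx]
      rw [hcontm]
      by_cases hx : x = uv.2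
      · subst hx
        rw [PySem.Dict.getD_modify, if_pos rfl, List.mem_append, List.mem_singleton]
        constructor
        · rintro ((hm | he) | ⟨hc, hr⟩)
          · exact Or.inl hm
          · refine Or.inr ⟨h, List.mem_cons.mpr (Or.inl ?_)⟩
            rw [he]
          · exact Or.inr ⟨hc, List.mem_cons.mpr (Or.inr hr)⟩
        · rintro (hm | ⟨hc, hm2⟩)
          · exact Or.inl (Or.inl hm)
          · rcases List.mem_cons.mp hm2 with he | hr
            · exact Or.inl (Or.inr (congrArg Prod.fst he))
            · exact Or.inr ⟨hc, hr⟩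
      · rw [PySem.Dict.getD_modify, if_neg hx]
        constructor
        · rintro (hm | ⟨hc, hr⟩)
          · exact Or.inl hm
          · exact Or.inr ⟨hc, List.mem_cons.mpr (Or.inr hr)⟩
        · rintro (hm | ⟨hc, hm2⟩)
          · exact Or.inl hm
          · rcases List.mem_cons.mp hm2 with he | hr
            · exact absurd (congrArg Prod.snd he) hx
            · exact Or.inr ⟨hc, hr⟩
    · rw [if_neg h, ih]
      constructor
      · rintro (hm | ⟨hc, hr⟩)
        · exact Or.inl hm
        · exact Or.inr ⟨hc, List.mem_cons.mpr (Or.inr hr)⟩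
      · rintro (hm | ⟨hc, hm2⟩)
        · exact Or.inl hm
        · rcases List.mem_cons.mp hm2 with he | hr
          · exfalso
            have hx2 : x = uv.2 := congrArg Prod.snd he
            rw [hx2] at hc
            exact h hc
          · exact Or.inr ⟨hc, hr⟩

-- B's targets dict: per-attacker target list
theorem pv_targets_mem (attacks : List (String × String)) (c v : String) :
    v ∈ (attacks.foldl (fun t uv => t.modify uv.1 [] (fun l => l ++ [uv.2]))
        (PySem.Dict.empty : PySem.Dict String (List String))).getD c []
      ↔ (c, v) ∈ attacks := by
  rw [PySem.Dict.getD_foldl_modify_append]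
  simp only [PySem.Dict.getD_empty, List.nil_append, List.mem_map, List.mem_filter]
  constructor
  · rintro ⟨uv, ⟨huv, hfst⟩, hsnd⟩
    have h1 : uv.1 = c := by simpa using hfst
    have huvq : uv = (c, v) := by
      cases uv
      simp only at h1 hsnd
      simp [h1, hsnd]
    rwa [huvq] at huv
  · intro h
    exact ⟨(c, v), ⟨h, by simp⟩, rfl⟩

-- B's nested defeated-update loop
theorem pv_mem_foldl_update (g : String → List String) :
    ∀ (wave : List String) (s : PySem.Set String) (y : String),
    y ∈ wave.foldl (fun s c => (g c).foldl (fun s v => PySem.Set.add s v) s) s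
      ↔ y ∈ s ∨ ∃ c ∈ wave, y ∈ g c := by
  intro wave
  induction wave with
  | nil => simp
  | cons c t ih =>
    intro s y
    simp only [List.foldl_cons]
    rw [ih]
    have hinner : y ∈ (g c).foldl (fun s v => PySem.Set.add s v) s ↔ y ∈ s ∨ y ∈ g c := by
      rw [PySem.Set.mem_foldl_add]
      simp [eq_comm]
    rw [hinner]
    constructor
    · rintro ((hs | hg) | ⟨c', hc', hg'⟩)
      · exact Or.inl hs
      · exact Or.inr ⟨c, List.mem_cons_self, hg⟩
      · exact Or.inr ⟨c', List.mem_cons_of_mem _ hc', hg'⟩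
    · rintro (hs | ⟨c', hc', hg'⟩)
      · exact Or.inl (Or.inl hs)
      · rcases List.mem_cons.mp hc' with rfl | hct
        · exact Or.inl (Or.inr hg')
        · exact Or.inr ⟨c', hct, hg'⟩

-- F(S) as an ordered set comprehension over atoms
theorem pvF_eq (atoms : List String) (attacks : List (String × String)) (S : PySem.Set String) :
    pvF atoms attacks S = PySem.Set.ofList (atoms.filter (fun a =>
      ((attacks.foldl (fun d uv =>
          if d.contains uv.2 then d.modify uv.2 PySem.Set.empty (fun s => PySem.Set.add s uv.1) else d)
          (atoms.foldl (fun d a => d.insert a PySem.Set.empty) (PySem.Dict.empty : PySem.Dict String (PySem.Set String)))).getD a PySem.Set.empty).all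
        (fun b => S.any (fun c => attacks.contains (c, b))))) := by
  unfold pvF
  rw [PySem.Set.ofList_eq_foldl, ← PySem.List.foldl_if_eq_foldl_filter]
  exact rfl

theorem pv_contains_eq (s : PySem.Set String) (a : String) :
    PySem.Set.contains s a = decide (a ∈ s) := by
  by_cases h : a ∈ s
  · rw [(PySem.Set.contains_iff s a).mpr h]; simp [h]
  · have hns : ¬ (PySem.Set.contains s a = true) := fun hc => h ((PySem.Set.contains_iff s a).mp hc)
    rw [decide_eq_false h]
    exact Bool.eq_false_iff.mpr hns

theorem pv_mem_dedup (l : List String) (x : String) :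
    x ∈ PySem.List.dedup l ↔ x ∈ l := by
  simp only [PySem.List.dedup]
  exact PySem.Set.mem_ofList l x

theorem pv_mem_F (atoms : List String) (attacks : List (String × String)) (S : PySem.Set String)
    (x : String) :
    x ∈ pvF atoms attacks S
      ↔ x ∈ atoms ∧ ∀ u, (u, x) ∈ attacks → ∃ c ∈ S, (c, u) ∈ attacks := by
  rw [pvF_eq, PySem.Set.mem_ofList, List.mem_filter]
  have hget : ∀ y, (atoms.foldl (fun d a => d.insert a PySem.Set.empty) (PySem.Dict.empty : PySem.Dict String (PySem.Set String))).get? y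
      = if y ∈ atoms then some PySem.Set.empty else none := by
    intro y; rw [pv_attA_init]; by_cases h : y ∈ atoms <;> simp [h]
  have hcont : ∀ y, (atoms.foldl (fun d a => d.insert a PySem.Set.empty) (PySem.Dict.empty : PySem.Dict String (PySem.Set String))).contains y = true ↔ y ∈ atoms := by
    intro y; rw [PySem.Dict.contains_eq_isSome_get?, hget]
    by_cases h : y ∈ atoms <;> simp [h]
  have hgetD : ∀ y, (atoms.foldl (fun d a => d.insert a PySem.Set.empty) (PySem.Dict.empty : PySem.Dict String (PySem.Set String))).getD y PySem.Set.empty = PySem.Set.empty := by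
    intro y; rw [PySem.Dict.getD_eq_get?_getD, hget]
    by_cases h : y ∈ atoms <;> simp [h]
  have hAtt : ∀ (a u : String),
      u ∈ ((attacks.foldl (fun d uv =>
          if d.contains uv.2 then d.modify uv.2 PySem.Set.empty (fun s => PySem.Set.add s uv.1) else d)
          (atoms.foldl (fun d a => d.insert a PySem.Set.empty) (PySem.Dict.empty : PySem.Dict String (PySem.Set String)))).getD a PySem.Set.empty)
        ↔ a ∈ atoms ∧ (u, a) ∈ attacks := by
    intro a u
    rw [pv_attA_mem, hgetD]
    constructor
    · rintro (hm | ⟨hc, hr⟩)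
      · exact absurd hm (by simp [PySem.Set.empty])
      · exact ⟨(hcont a).mp hc, hr⟩
    · rintro ⟨ha, hr⟩
      exact Or.inr ⟨(hcont a).mpr ha, hr⟩
  refine and_congr_right fun hx => ?_
  rw [List.all_eq_true]
  constructor
  · intro h u hu
    have := h u ((hAtt x u).mpr ⟨hx, hu⟩)
    rw [List.any_eq_true] at this
    obtain ⟨c, hc, hcb⟩ := this
    exact ⟨c, hc, List.contains_iff_mem.mp hcb⟩
  · intro h b hb
    obtain ⟨-, hba⟩ := (hAtt x b).mp hb
    obtain ⟨c, hc, hcu⟩ := h b hba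
    rw [List.any_eq_true]
    exact ⟨c, hc, List.contains_iff_mem.mpr hcu⟩

theorem pv_nodup_F (atoms : List String) (attacks : List (String × String)) (S : PySem.Set String) :
    (pvF atoms attacks S).Nodup := by
  rw [pvF_eq]; exact PySem.Set.nodup_ofList _

-- inserting the same value at existing keys: effect on items
theorem pv_items_foldl_insert_const {ν : Type} (l : List String) (v : ν) :
    ∀ d : PySem.Dict String ν, (∀ a ∈ l, d.contains a = true) →
    (l.foldl (fun d a => d.insert a v) d).items
      = d.items.map (fun p => if l.contains p.1 then (p.1, v) else p) := by
  induction l with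
  | nil => intro d _; simp
  | cons a t ih =>
    intro d hd
    simp only [List.foldl_cons]
    rw [ih _ (by
      intro b hb
      rw [PySem.Dict.contains_insert]
      simp [hd b (List.mem_cons_of_mem _ hb)])]
    rw [PySem.Dict.items_insert_of_contains _ _ (hd a (List.mem_cons_self))]
    rw [List.map_map]
    apply List.map_congr_left
    intro p _
    simp only [Function.comp]
    by_cases hpa : p.1 = a
    · have hb : (p.1 == a) = true := by simp [hpa]
      simp [hb, hpa]
    · have hb : (p.1 == a) = false := by simp [hpa]
      simp [hb, hpa]

-- inserting the same value at existing keys: effect on lookups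
theorem pv_get?_foldl_insert_const {ν : Type} (l : List String) (v : ν) (x : String) :
    ∀ d : PySem.Dict String ν,
    (l.foldl (fun d a => d.insert a v) d).get? x = if x ∈ l then some v else d.get? x := by
  induction l with
  | nil => intro d; simp
  | cons a t ih =>
    intro d
    simp only [List.foldl_cons, ih, PySem.Dict.get?_insert, List.mem_cons]
    by_cases hx : x ∈ t
    · simp [hx]
    · by_cases hxa : x = a <;> simp [hx, hxa]

-- A's guarded re-assignment loop is a plain assignment loop (keys distinct, all still None)
theorem pv_condinsert_eq (v : Int) :
    ∀ (l : List String) (d : PySem.Dict String (Option Int)), l.Nodup →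
    (∀ a ∈ l, d.get? a = some none) →
    l.foldl (fun d a => if d.get? a = some none then d.insert a (some v) else d) d
      = l.foldl (fun d a => d.insert a (some v)) d := by
  intro l
  induction l with
  | nil => intro d _ _; rfl
  | cons a t ih =>
    intro d hnd hnone
    simp only [List.foldl_cons]
    rw [if_pos (hnone a List.mem_cons_self)]
    exact ih _ hnd.of_cons (by
      intro b hb
      rw [PySem.Dict.get?_insert]
      have : b ≠ a := fun h => (List.nodup_cons.mp hnd).1 (h ▸ hb)
      rw [if_neg this]
      exact hnone b (List.mem_cons_of_mem _ hb))

-- the initial depth dicts of A and B are equal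
theorem pv_depth0_eq (atoms : List String) :
    atoms.foldl (fun d a => d.insert a (none : Option Int)) PySem.Dict.empty
      = PySem.Dict.mk ((PySem.List.dedup atoms).map (fun a => (a, (none : Option Int)))) := by
  induction atoms using List.reverseRecOn with
  | nil => rfl
  | append_singleton l a ih =>
    rw [List.foldl_append, List.foldl_cons, List.foldl_nil, ih]
    have hded : PySem.List.dedup (l ++ [a]) = PySem.Set.add (PySem.List.dedup l) a :=
      PySem.Set.ofList_append_singleton l a
    rw [hded, PySem.Set.add_eq_ite]
    by_cases h : a ∈ PySem.List.dedup l
    · rw [if_pos h]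
      have hcont : (PySem.Dict.mk ((PySem.List.dedup l).map (fun a => (a, (none : Option Int))))).contains a = true := by
        rw [PySem.Dict.contains_eq_isSome_get?]
        have hg := pv_get?_mk_map (PySem.List.dedup l) (fun _ => (none : Option Int)) a
        rw [hg, if_pos h]; rfl
      apply PySem.Dict.ext
      rw [PySem.Dict.items_insert_of_contains _ _ hcont]
      show ((PySem.List.dedup l).map (fun a => (a, (none : Option Int)))).map
            (fun p => if p.1 == a then (a, none) else p)
          = (PySem.List.dedup l).map (fun a => (a, none))
      rw [List.map_map]
      apply List.map_congr_left
      intro x _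
      by_cases hxa : x = a
      · subst hxa; simp
      · simp [Function.comp, hxa]
    · rw [if_neg h]
      have hcont : (PySem.Dict.mk ((PySem.List.dedup l).map (fun a => (a, (none : Option Int))))).contains a = false := by
        rw [PySem.Dict.contains_eq_isSome_get?]
        have hg := pv_get?_mk_map (PySem.List.dedup l) (fun _ => (none : Option Int)) a
        rw [hg, if_neg h]; rfl
      apply PySem.Dict.ext
      rw [PySem.Dict.items_insert_of_not_contains _ _ hcont]
      show List.map (fun a => (a, (none : Option Int))) (PySem.List.dedup l) ++ [(a, none)]
          = List.map (fun a => (a, (none : Option Int))) (PySem.List.dedup l ++ [a])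
      rw [List.map_append]
      rfl

-- the simulation: A's fixpoint loop and B's incremental loop agree
theorem pv_sim (atoms : List String) (attacks : List (String × String)) :
    ∀ (fuel : Nat) (depth : PySem.Dict String (Option Int)) (S defeated : PySem.Set String)
      (undecided : List String) (i : Int),
    S.Nodup →
    (∀ a ∈ S, a ∈ atoms) →
    (∀ a ∈ S, a ∈ pvF atoms attacks S) →
    (∀ b : String, b ∈ defeated ↔ ∃ c ∈ S, (c, b) ∈ attacks) →
    undecided = (PySem.List.dedup atoms).filter (fun a => !(PySem.Set.contains S a)) →
    (∀ x : String, depth.contains x = true ↔ x ∈ atoms) →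
    (∀ a ∈ atoms, a ∉ S → depth.get? a = some none) →
    pvLoopA atoms attacks fuel depth S i
      = pvLoopB attacks
          (attacks.foldl (fun d uv =>
              if d.contains uv.2 then d.modify uv.2 [] (fun l => l ++ [uv.1]) else d)
            (PySem.Dict.mk ((PySem.List.dedup atoms).map (fun a => (a, ([] : List String))))))
          (attacks.foldl (fun t uv => t.modify uv.1 [] (fun l => l ++ [uv.2]))
            (PySem.Dict.empty : PySem.Dict String (List String)))
          fuel depth defeated undecided i := by
  intro fuel
  induction fuel with
  | zero =>
    intro depth S defeated undecided i _ _ _ _ _ _ _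
    rfl
  | succ n ih =>
    intro depth S defeated undecided i h1 h2 h3 h4 h5 h6 h7
    set AB : PySem.Dict String (List String) :=
      attacks.foldl (fun d uv =>
          if d.contains uv.2 then d.modify uv.2 [] (fun l => l ++ [uv.1]) else d)
        (PySem.Dict.mk ((PySem.List.dedup atoms).map (fun a => (a, ([] : List String)))))
      with hAB
    set TG : PySem.Dict String (List String) :=
      attacks.foldl (fun t uv => t.modify uv.1 [] (fun l => l ++ [uv.2]))
        (PySem.Dict.empty : PySem.Dict String (List String)) with hTG
    have hget0 : ∀ a : String,
        (PySem.Dict.mk ((PySem.List.dedup atoms).map (fun a => (a, ([] : List String))))).get? a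
          = if a ∈ PySem.List.dedup atoms then some [] else none :=
      fun a => pv_get?_mk_map (PySem.List.dedup atoms) (fun _ => ([] : List String)) a
    have hcont0 : ∀ a : String,
        (PySem.Dict.mk ((PySem.List.dedup atoms).map (fun a => (a, ([] : List String))))).contains a = true
          ↔ a ∈ atoms := by
      intro a
      rw [PySem.Dict.contains_eq_isSome_get?, hget0]
      by_cases h : a ∈ atoms <;> simp [pv_mem_dedup atoms a, h]
    have hgetD0 : ∀ a : String,
        (PySem.Dict.mk ((PySem.List.dedup atoms).map (fun a => (a, ([] : List String))))).getD a []
          = [] := by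
      intro a
      rw [PySem.Dict.getD_eq_get?_getD, hget0]
      by_cases h : a ∈ atoms <;> simp [pv_mem_dedup atoms a, h]
    have hABmem : ∀ a u : String, a ∈ atoms → (u ∈ AB.getD a [] ↔ (u, a) ∈ attacks) := by
      intro a u ha
      rw [hAB, pv_attB_mem, hgetD0]
      simp only [List.not_mem_nil, false_or]
      constructor
      · rintro ⟨-, h⟩; exact h
      · intro h; exact ⟨(hcont0 a).mpr ha, h⟩
    simp only [pvLoopA, pvLoopB]
    set wave := undecided.filter
      (fun a => (AB.getD a []).all (fun b => PySem.Set.contains defeated b)) with hwavedef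
    -- the B-side wave is exactly F(S) \\ S
    have hwave : ∀ x, x ∈ wave ↔ x ∈ pvF atoms attacks S ∧ x ∉ S := by
      intro x
      rw [hwavedef, List.mem_filter]
      constructor
      · rintro ⟨hxu, htest⟩
        rw [h5, List.mem_filter] at hxu
        obtain ⟨hxd, hxs⟩ := hxu
        have hxa : x ∈ atoms := (pv_mem_dedup atoms x).mp hxd
        have hxS : x ∉ S := by
          intro hm
          rw [pv_contains_eq] at hxs
          simp [hm] at hxs
        refine ⟨(pv_mem_F atoms attacks S x).mpr ⟨hxa, ?_⟩, hxS⟩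
        intro u hu
        rw [List.all_eq_true] at htest
        have hc := htest u ((hABmem x u hxa).mpr hu)
        rw [PySem.Set.contains_iff] at hc
        exact (h4 u).mp hc
      · rintro ⟨hxT, hxS⟩
        obtain ⟨hxa, hdef⟩ := (pv_mem_F atoms attacks S x).mp hxT
        constructor
        · rw [h5, List.mem_filter]
          refine ⟨(pv_mem_dedup atoms x).mpr hxa, ?_⟩
          rw [pv_contains_eq]
          simp [hxS]
        · rw [List.all_eq_true]
          intro u humem
          obtain ⟨c, hc, hcu⟩ := hdef u ((hABmem x u hxa).mp humem)
          exact (PySem.Set.contains_iff defeated u).mpr ((h4 u).mpr ⟨c, hc, hcu⟩)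
    -- the two stopping tests agree
    have hbranch : PySem.Set.equal (pvF atoms attacks S) S = wave.isEmpty := by
      rw [Bool.eq_iff_iff, PySem.Set.equal_iff, List.isEmpty_iff, List.eq_nil_iff_forall_not_mem]
      constructor
      · intro h x hx
        obtain ⟨hxT, hxS⟩ := (hwave x).mp hx
        exact hxS ((h x).mp hxT)
      · intro h x
        constructor
        · intro hxT
          by_contra hxS
          exact h x ((hwave x).mpr ⟨hxT, hxS⟩)
        · exact fun hxS => h3 x hxS
    rw [hbranch]
    by_cases hstop : wave.isEmpty = true
    · rw [if_pos hstop, if_pos hstop]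
    · rw [if_neg hstop, if_neg hstop]
      have hwnod : (PySem.Set.diff (pvF atoms attacks S) S).Nodup :=
        PySem.Set.nodup_diff _ _ (pv_nodup_F atoms attacks S)
      have hdmem : ∀ x, x ∈ PySem.Set.diff (pvF atoms attacks S) S
          ↔ x ∈ pvF atoms attacks S ∧ x ∉ S :=
        fun x => PySem.Set.mem_diff _ _ x
      have hwatoms : ∀ x ∈ wave, x ∈ atoms :=
        fun x hx => ((pv_mem_F atoms attacks S x).mp ((hwave x).mp hx).1).1
      have hdatoms : ∀ x ∈ PySem.Set.diff (pvF atoms attacks S) S, x ∈ atoms :=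
        fun x hx => ((pv_mem_F atoms attacks S x).mp ((hdmem x).mp hx).1).1
      rw [pv_condinsert_eq (i + 1) _ depth hwnod
        (fun a ha => h7 a (hdatoms a ha) ((hdmem a).mp ha).2)]
      have hdicts : (PySem.Set.diff (pvF atoms attacks S) S).foldl
            (fun d a => d.insert a (some (i + 1))) depth
          = wave.foldl (fun d a => d.insert a (some (i + 1))) depth := by
        apply PySem.Dict.ext
        rw [pv_items_foldl_insert_const _ _ _ (fun a ha => (h6 a).mpr (hdatoms a ha)),
            pv_items_foldl_insert_const _ _ _ (fun a ha => (h6 a).mpr (hwatoms a ha))]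
        apply List.map_congr_left
        intro p _
        have hceq : List.contains (PySem.Set.diff (pvF atoms attacks S) S) p.1
            = List.contains wave p.1 := by
          rw [Bool.eq_iff_iff, List.contains_iff_mem, List.contains_iff_mem]
          rw [hdmem, hwave]
        rw [hceq]
      rw [hdicts]
      apply ih
      · exact pv_nodup_F atoms attacks S
      · exact fun a ha => ((pv_mem_F atoms attacks S a).mp ha).1
      · intro a ha
        obtain ⟨haa, hdefend⟩ := (pv_mem_F atoms attacks S a).mp ha
        refine (pv_mem_F atoms attacks (pvF atoms attacks S) a).mpr ⟨haa, ?_⟩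
        intro u hu
        obtain ⟨c, hcS, hcu⟩ := hdefend u hu
        exact ⟨c, h3 c hcS, hcu⟩
      · intro b
        rw [pv_mem_foldl_update]
        constructor
        · rintro (hb | ⟨c, hcw, hbt⟩)
          · obtain ⟨c, hcS, hcb⟩ := (h4 b).mp hb
            exact ⟨c, h3 c hcS, hcb⟩
          · have hcb : (c, b) ∈ attacks := (pv_targets_mem attacks c b).mp (hTG ▸ hbt)
            exact ⟨c, ((hwave c).mp hcw).1, hcb⟩
        · rintro ⟨c, hcT, hcb⟩
          by_cases hcS : c ∈ S
          · exact Or.inl ((h4 b).mpr ⟨c, hcS, hcb⟩)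
          · refine Or.inr ⟨c, (hwave c).mpr ⟨hcT, hcS⟩, ?_⟩
            rw [hTG]
            exact (pv_targets_mem attacks c b).mpr hcb
      · rw [h5, List.filter_filter]
        apply List.filter_congr
        intro a _
        rw [Bool.eq_iff_iff]
        simp only [pv_contains_eq, PySem.Set.mem_ofList, Bool.and_eq_true, Bool.not_eq_true',
          decide_eq_false_iff_not]
        constructor
        · rintro ⟨hnw, hnS⟩
          intro haT
          exact hnw ((hwave a).mpr ⟨haT, hnS⟩)
        · intro hnT
          have hnS : a ∉ S := fun hS => hnT (h3 a hS)
          exact ⟨fun hw => hnT ((hwave a).mp hw).1, hnS⟩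
      · intro x
        rw [PySem.Dict.contains_eq_isSome_get?, pv_get?_foldl_insert_const]
        by_cases hx : x ∈ wave
        · simp [hx, hwatoms x hx]
        · rw [if_neg hx, ← PySem.Dict.contains_eq_isSome_get?]
          exact h6 x
      · intro a haA haT
        rw [pv_get?_foldl_insert_const, if_neg (fun hw => haT ((hwave a).mp hw).1)]
        exact h7 a haA fun hS => haT (h3 a hS)

-- ===== VERDICT (by name: the statement is the Claim_ definition above) =====
theorem defense_depth_spec : Claim_equal_defense_depth := by
  intro atoms attacks _
  unfold Spec_defense_depth defense_depth defense_depth_alt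
  rw [pv_depth0_eq]
  refine congrArg PySem.Dict.items (pv_sim atoms attacks (atoms.length + 1)
    (PySem.Dict.mk ((PySem.List.dedup atoms).map (fun a => (a, (none : Option Int)))))
    PySem.Set.empty PySem.Set.empty (PySem.List.dedup atoms) 0
    List.nodup_nil ?_ ?_ ?_ ?_ ?_ ?_)
  · intro a ha
    exact absurd ha (by simp [PySem.Set.empty])
  · intro a ha
    exact absurd ha (by simp [PySem.Set.empty])
  · intro b
    simp [PySem.Set.empty]
  · simp [PySem.Set.empty]
  · intro x
    rw [PySem.Dict.contains_eq_isSome_get?]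
    have hg := pv_get?_mk_map (PySem.List.dedup atoms) (fun _ => (none : Option Int)) x
    rw [hg]
    by_cases h : x ∈ atoms <;> simp [h]
  · intro a ha _
    have hg := pv_get?_mk_map (PySem.List.dedup atoms) (fun _ => (none : Option Int)) a
    rw [hg, if_pos ((pv_mem_dedup atoms a).mpr ha)]
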